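-- pv_equiv track=rewrite | github.com/lverweijen/AbstractTree | src/abstracttree/export.py | _escape_string
-- ===== SOURCE A (Python) =====
-- def _escape_string(text, what) -> str:
--     if isinstance(text, LiteralText):
--         return text
--
--     text = str(text)
--     if what == "dot":
--         text = '"' + text.replace('"', '\\"') + '"'
--     elif what == "mermaid":
--         text = text.replace("#", "#35;")
--         text = text.replace("`", "#96;")
--         text = text.replace('"', "#quot;")
--     elif what == "latex":
--         text = text.replace("\\", r"\textbackslash")
--         special_chars = "#$%&_{}"
--         for char in special_chars:
--             text = text.replace(char, f"\\{char}")
--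
--         text = text.replace("~", r"\~{}")
--         text = text.replace("^", r"\^{}")
--         text = text.replace("\n", r"\\")
--     return text
--
-- class LiteralText(str):
--     pass
-- ===== SOURCE B (Python) =====
-- class LiteralText(str):
--     pass
--
--
-- # One-pass escaping: per-mode translation table applied with str.translate
-- # instead of A's chained .replace passes.
-- _DOT = str.maketrans({'"': '\\"'})
-- _MERMAID = str.maketrans({"#": "#35;", "`": "#96;", '"': "#quot;"})
-- _LATEX = str.maketrans({
--     "\\": r"\textbackslash",
--     "#": r"\#", "$": r"\$", "%": r"\%", "&": r"\&",
--     "_": r"\_", "{": r"\{", "}": r"\}",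
--     "~": r"\~{}", "^": r"\^{}", "\n": r"\\",
-- })
--
--
-- def _escape_string(text, what) -> str:
--     if isinstance(text, LiteralText):
--         return text
--     text = str(text)
--     if what == "dot":
--         return '"' + text.translate(_DOT) + '"'
--     if what == "mermaid":
--         return text.translate(_MERMAID)
--     if what == "latex":
--         return text.translate(_LATEX)
--     return text
-- ===== Notes on version B (the rewrite author's own statement) =====
-- stated objective: idiomatic
-- what changed: Replaces A's sequence of whole-string .replace passes (up to 11 for latex) with one per-mode translation table built once via str.maketrans and applied in a single pass with text.translate.
import Mathlib
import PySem

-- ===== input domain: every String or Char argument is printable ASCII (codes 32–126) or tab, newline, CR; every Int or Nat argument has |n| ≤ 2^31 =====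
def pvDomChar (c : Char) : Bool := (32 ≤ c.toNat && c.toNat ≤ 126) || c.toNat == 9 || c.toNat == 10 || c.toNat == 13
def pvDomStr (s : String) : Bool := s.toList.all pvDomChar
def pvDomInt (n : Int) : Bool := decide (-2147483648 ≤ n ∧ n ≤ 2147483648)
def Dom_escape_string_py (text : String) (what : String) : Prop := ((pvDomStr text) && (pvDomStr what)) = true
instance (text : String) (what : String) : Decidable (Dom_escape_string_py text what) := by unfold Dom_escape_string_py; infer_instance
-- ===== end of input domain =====

-- B replaces A's chained whole-string .replace passes with one per-mode translation
-- table applied in a single pass (str.translate); the return values agree.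
-- (The LiteralText isinstance branch cannot fire for a plain String argument and is
-- dropped in both ports.)

-- ===== PORT A =====
-- A: chained str.replace passes per mode (the latex loop over "#$%&_{}" is a foldl).
def escape_string_py (text : String) (what : String) : String :=
  if what = "dot" then
    "\"" ++ PySem.Str.replace text "\"" "\\\"" ++ "\""
  else if what = "mermaid" then
    let t1 := PySem.Str.replace text "#" "#35;"
    let t2 := PySem.Str.replace t1 "`" "#96;"
    PySem.Str.replace t2 "\"" "#quot;"
  else if what = "latex" then
    let t1 := PySem.Str.replace text "\\" "\\textbackslash"
    let t2 := ['#', '$', '%', '&', '_', '{', '}'].foldl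
      (fun t c => PySem.Str.replace t (String.ofList [c]) (String.ofList ['\\', c])) t1
    let t3 := PySem.Str.replace t2 "~" "\\~{}"
    let t4 := PySem.Str.replace t3 "^" "\\^{}"
    PySem.Str.replace t4 "\n" "\\\\"
  else text

-- ===== PORT B =====
-- B: per-mode translation table (the str.maketrans dict), applied char by char in one pass.
def pvDotTable : List (Char × List Char) := [('"', ['\\', '"'])]
def pvMermaidTable : List (Char × List Char) :=
  [('#', "#35;".toList), ('`', "#96;".toList), ('"', "#quot;".toList)]
def pvLatexTable : List (Char × List Char) :=
  [('\\', "\\textbackslash".toList),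
   ('#', "\\#".toList), ('$', "\\$".toList), ('%', "\\%".toList), ('&', "\\&".toList),
   ('_', "\\_".toList), ('{', "\\{".toList), ('}', "\\}".toList),
   ('~', "\\~{}".toList), ('^', "\\^{}".toList), ('\n', "\\\\".toList)]

def pvTranslate (table : List (Char × List Char)) (s : String) : String :=
  String.ofList (s.toList.flatMap (fun c => (List.lookup c table).getD [c]))

def escape_string_py_alt (text : String) (what : String) : String :=
  if what = "dot" then "\"" ++ pvTranslate pvDotTable text ++ "\""
  else if what = "mermaid" then pvTranslate pvMermaidTable text
  else if what = "latex" then pvTranslate pvLatexTable text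
  else text

-- ===== PRECONDITION & SPEC =====
def Spec_escape_string_py (text : String) (what : String) (out : String) : Prop := out = escape_string_py_alt text what
instance (text : String) (what : String) (out : String) : Decidable (Spec_escape_string_py text what out) := by unfold Spec_escape_string_py; infer_instance

-- ===== CLAIM (what is proved, stated in full; the proofs are below) =====
def Claim_equal_escape_string_py : Prop := ∀ (text : String) (what : String), Dom_escape_string_py text what → Spec_escape_string_py text what (escape_string_py text what)

-- ===== LEMMAS AND PROOFS =====


theorem replace_go_single (c : Char) (new : List Char) :
    ∀ (s acc : List Char), PySem.Chars.replace.go [c] new s.length s acc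
      = acc.reverse ++ s.flatMap (fun a => if a = c then new else [a]) := by
  intro s
  induction s with
  | nil => intro acc; unfold PySem.Chars.replace.go; simp
  | cons a t ih =>
    intro acc
    unfold PySem.Chars.replace.go
    simp only [List.length_cons, List.isPrefixOf, Bool.and_true, List.flatMap_cons]
    by_cases h : a = c
    · simp [h, ih]
    · have : (c == a) = false := by simp; exact fun e => h e.symm
      simp [this, h, ih]

theorem replace_single (s : List Char) (c : Char) (new : List Char) :
    PySem.Chars.replace s [c] new = s.flatMap (fun a => if a = c then new else [a]) := by
  unfold PySem.Chars.replace
  simp [replace_go_single]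

theorem str_replace_single (s old : String) (c : Char) (new : String) (h : old.toList = [c]) :
    (PySem.Str.replace s old new).toList
      = s.toList.flatMap (fun a => if a = c then new.toList else [a]) := by
  simp [PySem.Str.toList_replace, h, replace_single]

theorem dot_eq (text : String) :
    PySem.Str.replace text "\"" "\\\"" = pvTranslate pvDotTable text := by
  apply String.toList_inj.mp
  rw [str_replace_single _ _ '"' _ (by decide)]
  unfold pvTranslate
  simp only [String.toList_ofList]
  apply List.flatMap_congr
  intro a _
  by_cases h : a = '"'
  · simp [h, pvDotTable]
  · simp [pvDotTable, List.lookup, beq_eq_false_iff_ne.mpr h, h]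

theorem mermaid_eq (text : String) :
    PySem.Str.replace (PySem.Str.replace (PySem.Str.replace text "#" "#35;") "`" "#96;") "\"" "#quot;"
      = pvTranslate pvMermaidTable text := by
  apply String.toList_inj.mp
  rw [str_replace_single _ _ '"' _ (by decide), str_replace_single _ _ '`' _ (by decide),
      str_replace_single _ _ '#' _ (by decide)]
  unfold pvTranslate
  simp only [String.toList_ofList, List.flatMap_assoc]
  apply List.flatMap_congr
  intro a _
  by_cases h1 : a = '#'
  · subst h1; decide
  by_cases h2 : a = '`'
  · subst h2; decide
  by_cases h3 : a = '"'
  · subst h3; decide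
  simp [pvMermaidTable, List.lookup, h1, h2, h3, beq_eq_false_iff_ne.mpr h1,
    beq_eq_false_iff_ne.mpr h2, beq_eq_false_iff_ne.mpr h3]

theorem latex_eq (text : String) :
    PySem.Str.replace (PySem.Str.replace (PySem.Str.replace
      (['#', '$', '%', '&', '_', '{', '}'].foldl
        (fun t c => PySem.Str.replace t (String.ofList [c]) (String.ofList ['\\', c]))
        (PySem.Str.replace text "\\" "\\textbackslash"))
      "~" "\\~{}") "^" "\\^{}") "\n" "\\\\"
      = pvTranslate pvLatexTable text := by
  simp only [List.foldl_cons, List.foldl_nil]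
  apply String.toList_inj.mp
  rw [str_replace_single _ _ '\n' _ (by decide), str_replace_single _ _ '^' _ (by decide),
      str_replace_single _ _ '~' _ (by decide), str_replace_single _ _ '}' _ (by decide),
      str_replace_single _ _ '{' _ (by decide), str_replace_single _ _ '_' _ (by decide),
      str_replace_single _ _ '&' _ (by decide), str_replace_single _ _ '%' _ (by decide),
      str_replace_single _ _ '$' _ (by decide), str_replace_single _ _ '#' _ (by decide),
      str_replace_single _ _ '\\' _ (by decide)]
  unfold pvTranslate
  simp only [String.toList_ofList, List.flatMap_assoc]
  apply List.flatMap_congr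
  intro a _
  by_cases h1 : a = '\\'
  · subst h1; decide
  by_cases h2 : a = '#'
  · subst h2; decide
  by_cases h3 : a = '$'
  · subst h3; decide
  by_cases h4 : a = '%'
  · subst h4; decide
  by_cases h5 : a = '&'
  · subst h5; decide
  by_cases h6 : a = '_'
  · subst h6; decide
  by_cases h7 : a = '{'
  · subst h7; decide
  by_cases h8 : a = '}'
  · subst h8; decide
  by_cases h9 : a = '~'
  · subst h9; decide
  by_cases h10 : a = '^'
  · subst h10; decide
  by_cases h11 : a = '\n'
  · subst h11; decide
  simp [pvLatexTable, List.lookup, h1, h2, h3, h4, h5, h6, h7, h8, h9, h10, h11,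
    beq_eq_false_iff_ne.mpr h1, beq_eq_false_iff_ne.mpr h2, beq_eq_false_iff_ne.mpr h3,
    beq_eq_false_iff_ne.mpr h4, beq_eq_false_iff_ne.mpr h5, beq_eq_false_iff_ne.mpr h6,
    beq_eq_false_iff_ne.mpr h7, beq_eq_false_iff_ne.mpr h8, beq_eq_false_iff_ne.mpr h9,
    beq_eq_false_iff_ne.mpr h10, beq_eq_false_iff_ne.mpr h11]

-- ===== VERDICT (by name: the statement is the Claim_ definition above) =====
theorem escape_string_py_spec : Claim_equal_escape_string_py := by
  intro text what _
  unfold Spec_escape_string_py escape_string_py escape_string_py_alt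
  split_ifs
  · rw [dot_eq]
  · exact mermaid_eq text
  · exact latex_eq text
  · rfl
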